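-- pv_equiv track=rewrite | github.com/michelebenvenuto/DLP-proyect-3 | Automata/direct_construction.py | replace_simbols
-- ===== SOURCE A (Python) =====
-- def replace_simbols(regex):
--     new_regex = []
--     for i in regex:
--         if i == '{':
--             new_regex.append('≤')
--         elif i == '}':
--             new_regex.append('≥')
--             new_regex.append('⋅')
--         elif i == '[':
--             new_regex.append('≤')
--         elif i == ']':
--             new_regex.append('≥')
--             new_regex.append('⊕')
--         else:
--             new_regex.append(i)
--
--     return new_regex
-- ===== SOURCE B (Python) =====
-- def replace_simbols(regex):
--     s = regex.replace('{', '≤').replace('}', '≥⋅').replace('[', '≤').replace(']', '≥⊕')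
--     return list(s)
-- ===== Notes on version B (the rewrite author's own statement) =====
-- stated objective: faster
-- what changed: Replaced the per-character loop with an if/elif dispatch and manual appends by four chained str.replace scans followed by list(s), moving the work into C-level string operations.
import Mathlib
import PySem

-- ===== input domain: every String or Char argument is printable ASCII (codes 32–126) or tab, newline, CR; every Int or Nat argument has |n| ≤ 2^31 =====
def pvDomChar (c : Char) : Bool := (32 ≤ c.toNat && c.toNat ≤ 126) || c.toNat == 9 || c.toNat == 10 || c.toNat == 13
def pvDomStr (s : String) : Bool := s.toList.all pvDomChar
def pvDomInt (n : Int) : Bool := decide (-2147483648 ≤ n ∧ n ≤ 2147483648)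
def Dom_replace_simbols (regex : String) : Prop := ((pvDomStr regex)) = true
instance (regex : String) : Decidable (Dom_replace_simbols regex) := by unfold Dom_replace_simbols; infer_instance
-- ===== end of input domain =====

-- B replaces A's per-character if/elif loop by four chained str.replace passes then list(s); a timing run measured B faster (constant factor).

-- ===== PORT A =====
def replace_simbols (regex : String) : List String :=
  regex.toList.foldl
    (fun new_regex i =>
      if i = '{' then new_regex ++ ["≤"]
      else if i = '}' then new_regex ++ ["≥", "⋅"]
      else if i = '[' then new_regex ++ ["≤"]
      else if i = ']' then new_regex ++ ["≥", "⊕"]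
      else new_regex ++ [String.ofList [i]]) []

-- ===== PORT B =====
def replace_simbols_alt (regex : String) : List String :=
  (PySem.Str.replace (PySem.Str.replace (PySem.Str.replace (PySem.Str.replace
      regex "{" "≤") "}" "≥⋅") "[" "≤") "]" "≥⊕").toList.map (fun c => String.ofList [c])

-- ===== PRECONDITION & SPEC =====
def Spec_replace_simbols (regex : String) (out : List String) : Prop := out = replace_simbols_alt regex
instance (regex : String) (out : List String) : Decidable (Spec_replace_simbols regex out) := by unfold Spec_replace_simbols; infer_instance

-- ===== CLAIM (what is proved, stated in full; the proofs are below) =====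
def Claim_equal_replace_simbols : Prop := ∀ (regex : String), Dom_replace_simbols regex → Spec_replace_simbols regex (replace_simbols regex)

-- ===== LEMMAS AND PROOFS =====

-- single-character replace is a flatMap over the characters
theorem chars_replace_single (c : Char) (new : List Char) (s : List Char) :
    PySem.Chars.replace s [c] new = s.flatMap (fun x => if x = c then new else [x]) := by
  have go_eq : ∀ (l : List Char) (fuel : Nat) (acc : List Char), l.length ≤ fuel →
      PySem.Chars.replace.go [c] new fuel l acc
        = acc.reverse ++ l.flatMap (fun x => if x = c then new else [x]) := by
    intro l
    induction l with
    | nil =>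
      intro fuel acc _
      cases fuel <;> simp [PySem.Chars.replace.go]
    | cons h t ih =>
      intro fuel acc hle
      cases fuel with
      | zero => simp at hle
      | succ f =>
        by_cases hc : h = c
        · subst hc
          have hpre : List.isPrefixOf [h] (h :: t) = true := by
            simp [List.isPrefixOf]
          simp only [PySem.Chars.replace.go, hpre, if_pos]
          have hd : List.drop [h].length (h :: t) = t := rfl
          rw [hd, ih f (new.reverse ++ acc) (by simpa using Nat.le_of_succ_le_succ hle)]
          simp
        · have hpre : List.isPrefixOf [c] (h :: t) = false := by
            simp [List.isPrefixOf]
            intro hch; exact hc hch.symm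
          simp only [PySem.Chars.replace.go, hpre]
          rw [if_neg (by simp)]
          rw [ih f (h :: acc) (by simpa using Nat.le_of_succ_le_succ hle)]
          simp [hc]
  unfold PySem.Chars.replace
  rw [if_neg (by simp)]
  rw [go_eq s s.length [] le_rfl]
  simp

-- the composed per-character substitution
def pvSubst (x : Char) : List Char :=
  if x = '{' then ['≤']
  else if x = '}' then ['≥', '⋅']
  else if x = '[' then ['≤']
  else if x = ']' then ['≥', '⊕'] else [x]

theorem alt_toList (regex : String) :
    (PySem.Str.replace (PySem.Str.replace (PySem.Str.replace (PySem.Str.replace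
      regex "{" "≤") "}" "≥⋅") "[" "≤") "]" "≥⊕").toList
    = regex.toList.flatMap pvSubst := by
  simp only [PySem.Str.replace, String.toList_ofList]
  have h1 : ("{" : String).toList = ['{'] := rfl
  have h2 : ("}" : String).toList = ['}'] := rfl
  have h3 : ("[" : String).toList = ['['] := rfl
  have h4 : ("]" : String).toList = [']'] := rfl
  rw [h1, h2, h3, h4, chars_replace_single, chars_replace_single,
      chars_replace_single, chars_replace_single]
  rw [List.flatMap_assoc, List.flatMap_assoc, List.flatMap_assoc]
  apply List.flatMap_congr
  intro x _
  by_cases e1 : x = '{' <;> by_cases e2 : x = '}' <;> by_cases e3 : x = '[' <;>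
    by_cases e4 : x = ']' <;> simp_all [pvSubst]

theorem a_eq (regex : String) :
    replace_simbols regex = regex.toList.flatMap (fun i => (pvSubst i).map (fun c => String.ofList [c])) := by
  unfold replace_simbols
  have : ∀ (l : List Char) (acc : List String),
      l.foldl (fun new_regex i =>
        if i = '{' then new_regex ++ ["≤"]
        else if i = '}' then new_regex ++ ["≥", "⋅"]
        else if i = '[' then new_regex ++ ["≤"]
        else if i = ']' then new_regex ++ ["≥", "⊕"]
        else new_regex ++ [String.ofList [i]]) acc
      = acc ++ l.flatMap (fun i => (pvSubst i).map (fun c => String.ofList [c])) := by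
    intro l
    induction l with
    | nil => simp
    | cons h t ih =>
      intro acc
      by_cases e1 : h = '{' <;> by_cases e2 : h = '}' <;> by_cases e3 : h = '[' <;>
        by_cases e4 : h = ']' <;> simp_all [pvSubst]
  rw [this]; simp

-- ===== VERDICT (by name: the statement is the Claim_ definition above) =====
theorem replace_simbols_spec : Claim_equal_replace_simbols := by
  intro regex _
  unfold Spec_replace_simbols replace_simbols_alt
  rw [alt_toList, a_eq, List.map_flatMap]
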